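-- pv_equiv track=rewrite | github.com/stmcgovern/helion | helion/_compiler/cute/cute_reshape.py | _coords_from_flat_index
-- ===== SOURCE A (Python) =====
-- def _coords_from_flat_index(
--     flat_index: str,
--     shape: list[int],
-- ) -> list[str]:
--     """Convert a row-major flat index to ND coordinates."""
--     coords: list[str] = []
--     ndim = len(shape)
--     for i in range(ndim):
--         size = shape[i]
--         if size == 1:
--             coords.append("cutlass.Int32(0)")
--             continue
--         stride = 1
--         for j in range(i + 1, ndim):
--             stride *= shape[j]
--         if stride == 1:
--             coords.append(f"({flat_index}) % cutlass.Int32({size})")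
--         else:
--             coords.append(
--                 f"(({flat_index}) // cutlass.Int32({stride})) % cutlass.Int32({size})"
--             )
--     return coords
-- ===== SOURCE B (Python) =====
-- def _coords_from_flat_index(
--     flat_index: str,
--     shape: list[int],
-- ) -> list[str]:
--     """Convert a row-major flat index to ND coordinates (one backward pass)."""
--     coords: list[str] = []
--     stride = 1
--     for size in reversed(shape):
--         if size == 1:
--             coords.append("cutlass.Int32(0)")
--         elif stride == 1:
--             coords.append(f"({flat_index}) % cutlass.Int32({size})")
--         else:
--             coords.append(
--                 f"(({flat_index}) // cutlass.Int32({stride})) % cutlass.Int32({size})"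
--             )
--         stride *= size
--     coords.reverse()
--     return coords
-- ===== Notes on version B (the rewrite author's own statement) =====
-- stated objective: alternative
-- what changed: Replace the nested per-axis stride recomputation (a product loop over the trailing dimensions for every axis) with a single backward pass that maintains a running suffix-product stride and reverses the result; intended as faster (measured ~2x at n=1024, but unconfirmed at the largest size where both time out on huge-integer formatting).
import Mathlib
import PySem

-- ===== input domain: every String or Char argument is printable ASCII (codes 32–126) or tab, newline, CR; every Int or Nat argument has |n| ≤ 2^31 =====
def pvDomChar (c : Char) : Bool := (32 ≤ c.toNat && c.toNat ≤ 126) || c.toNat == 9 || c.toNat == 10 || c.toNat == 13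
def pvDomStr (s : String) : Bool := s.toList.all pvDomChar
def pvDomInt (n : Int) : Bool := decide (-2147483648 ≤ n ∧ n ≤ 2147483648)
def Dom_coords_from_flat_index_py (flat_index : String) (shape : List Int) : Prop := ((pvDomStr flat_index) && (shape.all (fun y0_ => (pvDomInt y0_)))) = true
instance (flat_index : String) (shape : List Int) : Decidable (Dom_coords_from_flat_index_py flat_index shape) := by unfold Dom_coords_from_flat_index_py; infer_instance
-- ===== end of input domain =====

-- B replaces A's per-axis product loop over the trailing dims by one backward pass
-- with a running suffix-product stride (alternative: O(n) multiplications instead of O(n^2)).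

-- ===== PORT A =====
-- literal port of _coords_from_flat_index: outer loop over range(ndim), inner
-- stride loop over range(i+1, ndim); indices are always in range, so Python's
-- xs[i] never raises and pyGetD with default 0 is exact here.
def coords_from_flat_index_py (flat_index : String) (shape : List Int) : List String :=
  let ndim : Int := PySem.List.len shape
  (PySem.List.pyRange 0 ndim 1).foldl
    (fun (coords : List String) (i : Int) =>
      let size := PySem.List.pyGetD shape i 0
      if size = 1 then coords ++ ["cutlass.Int32(0)"]
      else
        let stride := (PySem.List.pyRange (i + 1) ndim 1).foldl
          (fun (s : Int) (j : Int) => s * PySem.List.pyGetD shape j 0) 1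
        if stride = 1 then
          coords ++ ["(" ++ flat_index ++ ") % cutlass.Int32(" ++ PySem.Int.toStr size ++ ")"]
        else
          coords ++ ["((" ++ flat_index ++ ") // cutlass.Int32(" ++ PySem.Int.toStr stride
                      ++ ")) % cutlass.Int32(" ++ PySem.Int.toStr size ++ ")"])
    []

-- ===== PORT B =====
-- literal port of Source B: one fold over reversed(shape) carrying (coords, stride),
-- followed by the final list reversal.
def coords_from_flat_index_py_alt (flat_index : String) (shape : List Int) : List String :=
  let st := shape.reverse.foldl
    (fun (acc : List String × Int) (size : Int) =>
      let c :=
        if size = 1 then "cutlass.Int32(0)"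
        else if acc.2 = 1 then
          "(" ++ flat_index ++ ") % cutlass.Int32(" ++ PySem.Int.toStr size ++ ")"
        else
          "((" ++ flat_index ++ ") // cutlass.Int32(" ++ PySem.Int.toStr acc.2
            ++ ")) % cutlass.Int32(" ++ PySem.Int.toStr size ++ ")"
      (acc.1 ++ [c], acc.2 * size))
    ([], 1)
  st.1.reverse

-- ===== PRECONDITION & SPEC =====
def Spec_coords_from_flat_index_py (flat_index : String) (shape : List Int) (out : List String) : Prop := out = coords_from_flat_index_py_alt flat_index shape
instance (flat_index : String) (shape : List Int) (out : List String) : Decidable (Spec_coords_from_flat_index_py flat_index shape out) := by unfold Spec_coords_from_flat_index_py; infer_instance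

-- ===== CLAIM (what is proved, stated in full; the proofs are below) =====
def Claim_equal_coords_from_flat_index_py : Prop := ∀ (flat_index : String) (shape : List Int), Dom_coords_from_flat_index_py flat_index shape → Spec_coords_from_flat_index_py flat_index shape (coords_from_flat_index_py flat_index shape)

-- ===== LEMMAS AND PROOFS =====

-- the coordinate expression both programs emit for a dim of the given size and stride
def pvMk (f : String) (size stride : Int) : String :=
  if size = 1 then "cutlass.Int32(0)"
  else if stride = 1 then "(" ++ f ++ ") % cutlass.Int32(" ++ PySem.Int.toStr size ++ ")"
  else "((" ++ f ++ ") // cutlass.Int32(" ++ PySem.Int.toStr stride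
        ++ ")) % cutlass.Int32(" ++ PySem.Int.toStr size ++ ")"

-- the common specification: per dim, the coord with the suffix product as stride
def pvSpec (f : String) : List Int → List String
  | [] => []
  | s :: rest => pvMk f s rest.prod :: pvSpec f rest

theorem pvSpec_length (f : String) (shape : List Int) : (pvSpec f shape).length = shape.length := by
  induction shape with
  | nil => rfl
  | cons s rest ih => simp [pvSpec, ih]

theorem pvSpec_getElem (f : String) (shape : List Int) (k : Nat) (hk : k < shape.length) :
    (pvSpec f shape)[k]'(by rw [pvSpec_length]; exact hk) =
      pvMk f (shape[k]'hk) ((shape.drop (k + 1)).prod) := by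
  induction shape generalizing k with
  | nil => simp at hk
  | cons s rest ih =>
    cases k with
    | zero => simp [pvSpec]
    | succ k => simpa [pvSpec] using ih k (by simpa using hk)


-- right-to-left spec: coords emitted by B's backward pass starting at stride st
def pvSpecR (f : String) (st : Int) : List Int → List String
  | [] => []
  | s :: l => pvMk f s st :: pvSpecR f (st * s) l

theorem pvSpecR_append (f : String) (l1 l2 : List Int) : ∀ st : Int,
    pvSpecR f st (l1 ++ l2) = pvSpecR f st l1 ++ pvSpecR f (st * l1.prod) l2 := by
  induction l1 with
  | nil => intro st; simp [pvSpecR]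
  | cons s l ih =>
    intro st
    simp only [List.cons_append, pvSpecR, ih (st * s), List.prod_cons]
    rw [mul_assoc]

theorem pvSpecR_reverse (f : String) (shape : List Int) :
    (pvSpecR f 1 shape.reverse).reverse = pvSpec f shape := by
  induction shape with
  | nil => rfl
  | cons s rest ih =>
    have h1 : (s :: rest).reverse = rest.reverse ++ [s] := by simp
    rw [h1, pvSpecR_append, List.reverse_append]
    simp only [pvSpecR, List.reverse_cons, List.reverse_nil, List.nil_append,
      List.prod_reverse, one_mul, List.cons_append, List.nil_append, pvSpec, ih]

theorem B_fold (f : String) (l : List Int) : ∀ (acc : List String) (st : Int),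
    l.foldl
      (fun (acc : List String × Int) (size : Int) =>
        let c :=
          if size = 1 then "cutlass.Int32(0)"
          else if acc.2 = 1 then
            "(" ++ f ++ ") % cutlass.Int32(" ++ PySem.Int.toStr size ++ ")"
          else
            "((" ++ f ++ ") // cutlass.Int32(" ++ PySem.Int.toStr acc.2
              ++ ")) % cutlass.Int32(" ++ PySem.Int.toStr size ++ ")"
        (acc.1 ++ [c], acc.2 * size)) (acc, st) =
      (acc ++ pvSpecR f st l, st * l.prod) := by
  induction l with
  | nil => intro acc st; simp [pvSpecR]
  | cons s l ih =>
    intro acc st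
    simp only [List.foldl_cons, ih, pvSpecR, List.prod_cons, ← mul_assoc]
    simp [pvMk]

theorem B_eq_spec (f : String) (shape : List Int) :
    coords_from_flat_index_py_alt f shape = pvSpec f shape := by
  unfold coords_from_flat_index_py_alt
  rw [B_fold f shape.reverse [] 1]
  simpa using pvSpecR_reverse f shape

theorem A_eq_spec (f : String) (shape : List Int) :
    coords_from_flat_index_py f shape = pvSpec f shape := by
  unfold coords_from_flat_index_py
  refine Eq.trans (PySem.List.foldl_congr_mem _ _
    (fun (coords : List String) (i : Int) => coords ++
      [pvMk f (PySem.List.pyGetD shape i 0)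
        ((PySem.List.pyRange (i + 1) (PySem.List.len shape) 1).foldl
          (fun (s : Int) (j : Int) => s * PySem.List.pyGetD shape j 0) 1)]) _ ?_) ?_
  · intro acc i _
    simp only [pvMk]
    split_ifs <;> rfl
  · rw [PySem.List.foldl_append_singleton_eq_map, List.nil_append]
    apply List.ext_getElem
    · simp [PySem.List.length_pyRange_one, pvSpec_length]
    · intro k h1 h2
      have hk : k < shape.length := by
        simp only [List.length_map, PySem.List.length_pyRange_one, PySem.List.len_eq] at h1
        omega
      rw [List.getElem_map, PySem.List.getElem_pyRange_one, pvSpec_getElem f shape k hk]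
      have hget : PySem.List.pyGetD shape (0 + (k : Int)) 0 = shape[k]'hk := by
        simp [PySem.List.pyGetD_natCast, List.getD_eq_getElem?_getD, List.getElem?_eq_getElem hk]
      have hstride : (PySem.List.pyRange (0 + (k : Int) + 1) (PySem.List.len shape) 1).foldl
          (fun (s : Int) (j : Int) => s * PySem.List.pyGetD shape j 0) 1 =
          (shape.drop (k + 1)).prod := by
        rw [PySem.List.foldl_pyRange_pyGetD shape 0 (fun s j => s * j) 1 (by positivity)]
        have h3 : (0 + (k : Int) + 1).toNat = k + 1 := by omega
        rw [h3, List.prod_eq_foldl]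
      rw [hget, hstride]

-- ===== VERDICT (by name: the statement is the Claim_ definition above) =====
theorem coords_from_flat_index_py_spec : Claim_equal_coords_from_flat_index_py := by
  intro f shape _
  unfold Spec_coords_from_flat_index_py
  rw [A_eq_spec, B_eq_spec]
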